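-- pv_equiv track=rewrite | github.com/Osipo/FuzzySystemsLabs | DataScienceExamples/Data/Division.py | dividertoint
-- ===== SOURCE A (Python) =====
-- def dividertoint(ar1,ar2):
--     if not(isinstance(ar1,str) and isinstance(ar2,str)):
--         raise TypeError('Only str attribute and int precision!')
--     if not(len(ar1)>0 and len(ar2)>0):
--         raise AttributeError('No empty str are required!')
--     li1 = ar1.split('.')
--     num = li1[0]; numr = ''
--     if(len(li1)==2):
--         numr = li1[1]
--     li2 = ar2.split('.')
--     if(len(li2)==1):
--         return ar1,ar2
--
--     ds = len(li2[1])
--     integer = li2[0]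
--     real = li2[1]
--     i = 0
--     d = '' if integer=='0' else integer
--     while(i<ds):
--         d+= real[i]
--         num+=numr[i] if i<len(numr) else '0'
--         i+=1
--     if(i<len(numr)):
--         num+='.'
--     while(i<len(numr)):
--         num+=numr[i]
--         i+=1
--     return num,d
-- ===== SOURCE B (Python) =====
-- def dividertoint(ar1, ar2):
--     if not (isinstance(ar1, str) and isinstance(ar2, str)):
--         raise TypeError('Only str attribute and int precision!')
--     if not (len(ar1) > 0 and len(ar2) > 0):
--         raise AttributeError('No empty str are required!')
--     li1 = ar1.split('.')
--     num = li1[0]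
--     numr = li1[1] if len(li1) == 2 else ''
--     li2 = ar2.split('.')
--     if len(li2) == 1:
--         return ar1, ar2
--     integer, real = li2[0], li2[1]
--     ds = len(real)
--     d = ('' if integer == '0' else integer) + real
--     num += numr[:ds] + '0' * (ds - len(numr))
--     if len(numr) > ds:
--         num += '.' + numr[ds:]
--     return num, d
-- ===== Notes on version B (the rewrite author's own statement) =====
-- stated objective: simpler
-- what changed: Both character-accumulating while loops are removed: the shifted divisor is built as one concatenation (integer-part prefix + real) and the shifted numerator by slicing numr[:ds], padding with '0'*(ds-len(numr)), and appending '.'+numr[ds:] when fractional digits remain.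
import Mathlib
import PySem

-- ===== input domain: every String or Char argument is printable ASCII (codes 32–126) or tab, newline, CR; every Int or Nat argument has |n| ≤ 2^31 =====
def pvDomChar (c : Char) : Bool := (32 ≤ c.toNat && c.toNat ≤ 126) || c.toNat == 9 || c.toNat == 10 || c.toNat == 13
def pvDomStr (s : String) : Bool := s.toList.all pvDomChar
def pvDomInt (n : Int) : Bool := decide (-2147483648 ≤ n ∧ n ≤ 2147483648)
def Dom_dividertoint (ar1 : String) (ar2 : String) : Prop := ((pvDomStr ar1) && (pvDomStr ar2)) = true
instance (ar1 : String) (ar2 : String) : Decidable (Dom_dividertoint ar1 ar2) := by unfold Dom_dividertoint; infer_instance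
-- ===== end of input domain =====

-- B replaces A's two character-by-character while loops with one slice-and-pad
-- concatenation (objective: simpler).

-- ===== PORT A =====
-- first while loop of A: i counts up to ds, appending real[i] to d and
-- (numr[i] if i < len(numr) else '0') to num
def pvLoopA1 (real numr : List Char) (ds i : Nat) (num d : List Char) :
    List Char × List Char :=
  if h : i < ds then
    pvLoopA1 real numr ds (i + 1)
      (num ++ [if i < numr.length then PySem.List.pyGetD numr (i : Int) '0' else '0'])
      (d ++ [PySem.List.pyGetD real (i : Int) '0'])
  else (num, d)
termination_by ds - i
decreasing_by omega

-- second while loop of A: appends numr[i:] one character at a time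
def pvLoopA2 (numr : List Char) (i : Nat) (num : List Char) : List Char :=
  if h : i < numr.length then
    pvLoopA2 numr (i + 1) (num ++ [PySem.List.pyGetD numr (i : Int) '0'])
  else num
termination_by numr.length - i
decreasing_by omega

-- the isinstance TypeError never fires for str arguments; the AttributeError on
-- an empty string is excluded by Pre_dividertoint
def dividertoint (ar1 : String) (ar2 : String) : String × String :=
  let li1 := PySem.Chars.splitOn ar1.toList ['.']
  let num := PySem.List.pyGetD li1 (0 : Int) []
  let numr := if li1.length = 2 then PySem.List.pyGetD li1 (1 : Int) [] else []
  let li2 := PySem.Chars.splitOn ar2.toList ['.']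
  if li2.length = 1 then (ar1, ar2)
  else
    let ds := (PySem.List.pyGetD li2 (1 : Int) []).length
    let integer := PySem.List.pyGetD li2 (0 : Int) []
    let real := PySem.List.pyGetD li2 (1 : Int) []
    let d := if integer = ['0'] then [] else integer
    let p := pvLoopA1 real numr ds 0 num d
    let num2 := if ds < numr.length then p.1 ++ ['.'] else p.1
    let num3 := pvLoopA2 numr ds num2
    (String.ofList num3, String.ofList p.2)

-- ===== PORT B =====
def dividertoint_alt (ar1 : String) (ar2 : String) : String × String :=
  let li1 := PySem.Chars.splitOn ar1.toList ['.']
  let num := PySem.List.pyGetD li1 (0 : Int) []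
  let numr := if li1.length = 2 then PySem.List.pyGetD li1 (1 : Int) [] else []
  let li2 := PySem.Chars.splitOn ar2.toList ['.']
  if li2.length = 1 then (ar1, ar2)
  else
    let integer := PySem.List.pyGetD li2 (0 : Int) []
    let real := PySem.List.pyGetD li2 (1 : Int) []
    let ds := real.length
    let d := (if integer = ['0'] then [] else integer) ++ real
    -- num += numr[:ds] + '0' * (ds - len(numr))
    let num2 := num ++ PySem.List.slice numr none (some (ds : Int)) ++
      List.replicate (ds - numr.length) '0'
    -- if len(numr) > ds: num += '.' + numr[ds:]
    let num3 := if numr.length > ds then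
        num2 ++ '.' :: PySem.List.slice numr (some (ds : Int)) none
      else num2
    (String.ofList num3, String.ofList d)

-- ===== PRECONDITION & SPEC =====
-- Pre_ excludes empty ar1 or ar2, on which A raises AttributeError.
def Pre_dividertoint (ar1 : String) (ar2 : String) : Prop := ar1 ≠ "" ∧ ar2 ≠ ""
instance (ar1 : String) (ar2 : String) : Decidable (Pre_dividertoint ar1 ar2) := by
  unfold Pre_dividertoint; infer_instance
def pvWitness_dividertoint : String × String := ("1.5", "2.25")

def Spec_dividertoint (ar1 : String) (ar2 : String) (out : String × String) : Prop :=
  out = dividertoint_alt ar1 ar2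
instance (ar1 : String) (ar2 : String) (out : String × String) :
    Decidable (Spec_dividertoint ar1 ar2 out) := by unfold Spec_dividertoint; infer_instance

-- ===== CLAIM (what is proved, stated in full; the proofs are below) =====
def Claim_equal_dividertoint : Prop := ∀ (ar1 : String) (ar2 : String),
  Dom_dividertoint ar1 ar2 → Pre_dividertoint ar1 ar2 →
  Spec_dividertoint ar1 ar2 (dividertoint ar1 ar2)

-- ===== LEMMAS AND PROOFS =====
theorem pvLoopA1_eq (real numr : List Char) (k : Nat) :
    ∀ (i : Nat) (num d : List Char), i + k = real.length →
      pvLoopA1 real numr real.length i num d =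
        (num ++ (numr.drop i).take (real.length - i) ++
          List.replicate ((real.length - i) - (numr.length - i)) '0',
         d ++ real.drop i) := by
  induction k with
  | zero =>
    intro i num d hi
    rw [pvLoopA1, dif_neg (by omega : ¬ i < real.length)]
    simp [List.drop_eq_nil_of_le (by omega : real.length ≤ i),
      (by omega : real.length - i = 0)]
  | succ k ih =>
    intro i num d hi
    have hilt : i < real.length := by omega
    rw [pvLoopA1, dif_pos hilt, ih (i + 1) _ _ (by omega)]
    simp only [PySem.List.pyGetD_natCast, Prod.mk.injEq, List.append_assoc,
      List.singleton_append]
    refine ⟨?_, ?_⟩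
    · congr 1
      by_cases hn : i < numr.length
      · rw [List.drop_eq_getElem_cons hn,
          (by omega : real.length - i = (real.length - (i + 1)) + 1),
          List.take_succ_cons,
          (by omega : real.length - (i + 1) + 1 - (numr.length - i)
            = (real.length - (i + 1)) - (numr.length - (i + 1)))]
        simp [hn, List.getD_eq_getElem?_getD, List.getElem?_eq_getElem hn]
      · rw [List.drop_eq_nil_of_le (by omega : numr.length ≤ i),
          List.drop_eq_nil_of_le (by omega : numr.length ≤ i + 1)]
        simp [hn, (by omega : real.length - i = (real.length - (i + 1)) + 1),
          List.replicate_succ, (by omega : numr.length - i = 0),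
          (by omega : numr.length - (i + 1) = 0)]
    · congr 1
      rw [List.drop_eq_getElem_cons hilt]
      simp [List.getD_eq_getElem?_getD, List.getElem?_eq_getElem hilt]

theorem pvLoopA2_eq (numr : List Char) (k : Nat) :
    ∀ (i : Nat) (num : List Char), numr.length - i ≤ k →
      pvLoopA2 numr i num = num ++ numr.drop i := by
  induction k with
  | zero =>
    intro i num hk
    rw [pvLoopA2, dif_neg (by omega : ¬ i < numr.length)]
    simp [List.drop_eq_nil_of_le (by omega : numr.length ≤ i)]
  | succ k ih =>
    intro i num hk
    by_cases h : i < numr.length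
    · rw [pvLoopA2, dif_pos h, ih (i + 1) _ (by omega), List.drop_eq_getElem_cons h]
      simp [PySem.List.pyGetD_natCast, List.getD_eq_getElem?_getD,
        List.getElem?_eq_getElem h]
    · rw [pvLoopA2, dif_neg h]
      simp [List.drop_eq_nil_of_le (by omega : numr.length ≤ i)]

-- ===== VERDICT (by name: the statement is the Claim_ definition above) =====
theorem dividertoint_spec : Claim_equal_dividertoint := by
  intro ar1 ar2 _ _
  unfold Spec_dividertoint dividertoint dividertoint_alt
  set li1 := PySem.Chars.splitOn ar1.toList ['.'] with hli1
  set li2 := PySem.Chars.splitOn ar2.toList ['.'] with hli2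
  set num := PySem.List.pyGetD li1 (0 : Int) [] with hnum
  set numr := (if li1.length = 2 then PySem.List.pyGetD li1 (1 : Int) [] else []) with hnumr
  by_cases h1 : li2.length = 1
  · simp [h1]
  · simp only [if_neg h1]
    set real := PySem.List.pyGetD li2 (1 : Int) [] with hreal
    set integer := PySem.List.pyGetD li2 (0 : Int) [] with hinteger
    set d := (if integer = ['0'] then [] else integer) with hd
    rw [pvLoopA1_eq real numr real.length 0 num d (by omega)]
    rw [pvLoopA2_eq numr numr.length real.length _ (by omega)]
    simp only [List.drop_zero, Nat.sub_zero, PySem.List.slice_to_natCast,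
      PySem.List.slice_from_natCast, ← hnum, ← hnumr, ← hreal, ← hinteger, ← hd]
    by_cases h2 : real.length < numr.length
    · rw [if_pos h2, if_pos h2]
      simp [List.append_assoc]
    · rw [if_neg h2, if_neg h2]
      simp [List.drop_eq_nil_of_le (by omega : numr.length ≤ real.length)]
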